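-- pv_equiv track=rewrite | github.com/Shilenkovv/Algorithms_PyGen_bg | 6_search_algorithms/6_2_12.py | count_divisible_pairs
-- ===== SOURCE A (Python) =====
-- def count_divisible_pairs(nums: list[int]) -> int:
--     """
--     Counts the number of pairs (i, j) in the list where the product of elements is divisible by 13.
--
--     Args:
--         nums (list[int]): A list of integers, where 1 <= len(nums) <= 10^5.
--
--     Returns:
--         int: The total number of pairs where its product is divisible by 13.
--     """
--     divided_by_13 = 0
--     tot_pairs = 0
--     for i in range(len(nums)):
--         if not nums[i] % 13:
--             tot_pairs += len(nums) - 1 - divided_by_13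
--             divided_by_13 += 1
--     return tot_pairs
-- ===== SOURCE B (Python) =====
-- def count_divisible_pairs(nums: list[int]) -> int:
--     k = sum(1 for x in nums if x % 13 == 0)
--     return k * (len(nums) - 1) - k * (k - 1) // 2
-- ===== Notes on version B (the rewrite author's own statement) =====
-- stated objective: simpler
-- what changed: B replaces A's running pair accumulator (adding len-1-seen for each divisible element) by counting k = #elements divisible by 13 and returning the closed form k*(n-1) - k*(k-1)//2.
import Mathlib
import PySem

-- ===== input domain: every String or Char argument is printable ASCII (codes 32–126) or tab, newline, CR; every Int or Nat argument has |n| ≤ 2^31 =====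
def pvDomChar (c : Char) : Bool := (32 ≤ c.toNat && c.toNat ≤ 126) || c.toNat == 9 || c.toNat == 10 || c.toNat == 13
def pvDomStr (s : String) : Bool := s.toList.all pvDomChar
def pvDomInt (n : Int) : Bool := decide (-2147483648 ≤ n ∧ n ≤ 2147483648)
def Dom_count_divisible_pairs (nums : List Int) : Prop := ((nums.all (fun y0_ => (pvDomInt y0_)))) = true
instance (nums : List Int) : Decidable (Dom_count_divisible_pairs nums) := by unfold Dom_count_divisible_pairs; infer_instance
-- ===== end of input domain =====

-- B replaces A's running pair accumulator by counting k = #elements divisible by 13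
-- and returning the closed form k*(n-1) - k*(k-1)//2 (objective: simpler).

-- ===== PORT A =====
-- state (divided_by_13, tot_pairs); loop 'for i in range(len(nums)): if not nums[i] % 13: ...'
def count_divisible_pairs (nums : List Int) : Int :=
  ((PySem.List.pyRange 0 (PySem.List.len nums) 1).foldl
    (fun (st : Int × Int) i =>
      if PySem.Int.mod (PySem.List.pyGetD nums i 0) 13 = 0 then
        (st.1 + 1, st.2 + (PySem.List.len nums - 1 - st.1))
      else st)
    (0, 0)).2

-- ===== PORT B =====
-- k = sum(1 for x in nums if x % 13 == 0)
def pyCountK (nums : List Int) : Int :=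
  (nums.map (fun x => if PySem.Int.mod x 13 = 0 then (1 : Int) else 0)).sum

-- return k*(len(nums)-1) - k*(k-1)//2
def count_divisible_pairs_alt (nums : List Int) : Int :=
  pyCountK nums * (PySem.List.len nums - 1)
    - PySem.Int.floordiv (pyCountK nums * (pyCountK nums - 1)) 2

-- ===== PRECONDITION & SPEC =====
def Spec_count_divisible_pairs (nums : List Int) (out : Int) : Prop := out = count_divisible_pairs_alt nums
instance (nums : List Int) (out : Int) : Decidable (Spec_count_divisible_pairs nums out) := by unfold Spec_count_divisible_pairs; infer_instance

-- ===== CLAIM (what is proved, stated in full; the proofs are below) =====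
def Claim_equal_count_divisible_pairs : Prop := ∀ (nums : List Int), Dom_count_divisible_pairs nums → Spec_count_divisible_pairs nums (count_divisible_pairs nums)

-- ===== LEMMAS AND PROOFS =====

-- triangle numbers: tri k = 0 + 1 + ... + (k-1)
def tri : Nat → Int
  | 0 => 0
  | k + 1 => tri k + k

theorem two_mul_tri (k : Nat) : 2 * tri k = (k : Int) * ((k : Int) - 1) := by
  induction k with
  | zero => simp [tri]
  | succ k ih => simp only [tri]; push_cast; linarith

-- A's loop, over the element list, in closed form via the divisible count
theorem loopA (n : Int) (xs : List Int) : ∀ (d t : Int),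
    (xs.foldl
      (fun (st : Int × Int) x =>
        if PySem.Int.mod x 13 = 0 then (st.1 + 1, st.2 + (n - 1 - st.1)) else st)
      (d, t)).2
    = t + ((xs.countP (fun x => PySem.Int.mod x 13 = 0) : Nat) : Int) * (n - 1 - d)
        - tri (xs.countP (fun x => PySem.Int.mod x 13 = 0)) := by
  induction xs with
  | nil => intro d t; simp [tri]
  | cons x xs ih =>
    intro d t
    by_cases h : PySem.Int.mod x 13 = 0
    · simp only [List.foldl_cons, List.countP_cons, h, if_pos, decide_true, ih]
      simp only [tri]
      push_cast
      ring
    · simp only [List.foldl_cons, List.countP_cons, h, decide_false, ih]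
      simp

theorem sum_indicator_eq_countP (xs : List Int) :
    pyCountK xs = ((xs.countP (fun x => PySem.Int.mod x 13 = 0) : Nat) : Int) := by
  induction xs with
  | nil => simp [pyCountK]
  | cons x xs ih =>
    unfold pyCountK at *
    by_cases h : PySem.Int.mod x 13 = 0
    · simp only [List.map_cons, List.sum_cons, List.countP_cons, h, if_pos, decide_true, ih]
      push_cast; ring
    · simp only [List.map_cons, List.sum_cons, List.countP_cons, h, decide_false, ih]
      simp

-- ===== VERDICT (by name: the statement is the Claim_ definition above) =====
theorem count_divisible_pairs_spec : Claim_equal_count_divisible_pairs := by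
  intro nums _
  show count_divisible_pairs nums = count_divisible_pairs_alt nums
  unfold count_divisible_pairs count_divisible_pairs_alt
  rw [PySem.List.foldl_pyRange_zero_pyGetD nums 0
    (fun (st : Int × Int) x =>
      if PySem.Int.mod x 13 = 0 then (st.1 + 1, st.2 + (PySem.List.len nums - 1 - st.1)) else st)
    (0, 0)]
  rw [loopA (PySem.List.len nums) nums 0 0, sum_indicator_eq_countP]
  have h2 : ((nums.countP (fun x => PySem.Int.mod x 13 = 0) : Nat) : Int)
      * (((nums.countP (fun x => PySem.Int.mod x 13 = 0) : Nat) : Int) - 1)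
      = 2 * tri (nums.countP (fun x => PySem.Int.mod x 13 = 0)) := (two_mul_tri _).symm
  rw [h2, PySem.Int.floordiv_eq_ediv_of_pos (by norm_num), Int.mul_ediv_cancel_left _ (by norm_num)]
  ring
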